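/- CARRIED OVER by tools/port_base_units.py (renaming only) from proofs.vorbis/Vorbis/Spec/Units, GENERATED there by farm/mkstatement.py from design/units.tsv (unit `memcmp`) and the Specs of Vorbis/Spec/*.lean — do not edit.
   THE STATEMENT of the proof unit `memcmp`: the function `memcmp` (38 instructions) satisfies its contract,
   given the contracts of its callees. What the names mean: Vorbis/Spec/Basic.lean. The theorem to prove:
   `theorem memcmp_ok : ProgX.Base.Spec.memcmp.Statement`. -/
import ProgX.Base.Spec.LibcMisc
namespace ProgX.Base.Spec.memcmp
open X86 X86.User Asan

/-- The statement of unit `memcmp`. -/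
def Statement : Prop :=
  ∀ (Lay : Layout) (_hLay : Lay.hi = 0x1000000) (μ : Microarch) (_hμ : UserX.MicroOK μ) (u₀ : State)
    (_hcode : HasCodeNat Lay u₀ ProgX.Base.L.memcmp.entry ProgX.Base.Code.code_memcmp.nat ProgX.Base.L.memcmp.size)
    (_h_asan_load1_noabort : Asan.SmallCheck Lay μ ProgX.Base.WayInv (ProgX.Base.CodeOK u₀) [.rax, .rdx] 1 ProgX.Base.L.__asan_load1_noabort.entry),
    ∀ (others : List Obj) (frames : List (Nat × FrameLayout)), Calls Lay μ ProgX.Base.WayInv (ProgX.Base.conv u₀) ProgX.Base.L.memcmp.entry (ProgX.Base.Spec.memcmp.spec others frames)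

end ProgX.Base.Spec.memcmp
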